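-- pv_equiv track=rewrite | github.com/oleksandravozniuk/DecisionMakingTheory | tpr6/task1.py | transitivity
-- ===== SOURCE A (Python) =====
-- def transitivity(r):
--     transitive = True
--     for i in range(len(r)):
--         for j in range(len(r)):
--             for k in range(len(r)):
--                 if r[i][k] >= min(r[i][j], r[j][k]):
--                     continue
--                 else:
--                     transitive = False
--     return transitive
-- ===== SOURCE B (Python) =====
-- def transitivity(r):
--     n = len(r)
--     if n == 0:
--         return True
--     # max-min composition C = R o R
--     comp = [[max(min(r[i][j], r[j][k]) for j in range(n)) for k in range(n)]
--             for i in range(n)]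
--     # transitive  iff  R >= R o R  entrywise
--     return all(r[i][k] >= comp[i][k] for i in range(n) for k in range(n))
-- ===== Notes on version B (the rewrite author's own statement) =====
-- stated objective: alternative
-- what changed: B first materialises the max-min composition matrix C[i][k] = max_j min(r[i][j], r[j][k]) and then checks r >= C entrywise with all(), instead of A's single triple loop that keeps overwriting a boolean flag.
import Mathlib
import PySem

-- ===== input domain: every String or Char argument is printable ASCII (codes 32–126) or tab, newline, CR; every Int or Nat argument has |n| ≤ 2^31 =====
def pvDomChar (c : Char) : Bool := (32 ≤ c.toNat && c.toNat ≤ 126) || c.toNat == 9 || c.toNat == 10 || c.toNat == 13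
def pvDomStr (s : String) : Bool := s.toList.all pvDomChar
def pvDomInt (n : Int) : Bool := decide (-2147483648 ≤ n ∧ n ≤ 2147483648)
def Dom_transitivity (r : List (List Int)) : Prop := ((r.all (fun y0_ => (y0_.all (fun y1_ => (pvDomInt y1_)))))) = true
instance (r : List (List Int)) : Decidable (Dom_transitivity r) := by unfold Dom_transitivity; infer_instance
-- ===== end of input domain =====

-- B builds the max-min composition matrix and then checks R ≥ R∘R entrywise, instead of A's flag-overwriting triple loop.

-- r[i][k] for indices produced by range(0, len r): exact there (Pre_ excludes the IndexError inputs)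
def pvGet (r : List (List Int)) (i k : Int) : Int :=
  PySem.List.pyGetD (PySem.List.pyGetD r i []) k 0

-- ===== PORT A =====
def transitivity (r : List (List Int)) : Bool :=
  (PySem.List.pyRange 0 (PySem.List.len r) 1).foldl (fun t1 i =>
    (PySem.List.pyRange 0 (PySem.List.len r) 1).foldl (fun t2 j =>
      (PySem.List.pyRange 0 (PySem.List.len r) 1).foldl (fun t3 k =>
        if pvGet r i k ≥ min (pvGet r i j) (pvGet r j k) then t3 else false) t2) t1) true

-- ===== PORT B =====
def transitivity_alt (r : List (List Int)) : Bool :=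
  let n := PySem.List.len r
  if n == 0 then true
  else
    let comp : List (List Int) :=
      (PySem.List.pyRange 0 n 1).map (fun i =>
        (PySem.List.pyRange 0 n 1).map (fun k =>
          (PySem.List.max? ((PySem.List.pyRange 0 n 1).map
            (fun j => min (pvGet r i j) (pvGet r j k))) (fun x => x)).getD 0))
    (PySem.List.pyRange 0 n 1).all (fun i =>
      (PySem.List.pyRange 0 n 1).all (fun k =>
        decide (pvGet r i k ≥ PySem.List.pyGetD (PySem.List.pyGetD comp i []) k 0)))

-- ===== PRECONDITION & SPEC =====
-- Pre_: exactly the inputs where A returns (A raises IndexError when some row is shorter than len(r))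
def Pre_transitivity (r : List (List Int)) : Prop := ∀ row ∈ r, r.length ≤ row.length
instance (r : List (List Int)) : Decidable (Pre_transitivity r) := by unfold Pre_transitivity; infer_instance
def pvWitness_transitivity : List (List Int) := [[1, 0], [0, 1]]

def Spec_transitivity (r : List (List Int)) (out : Bool) : Prop := out = transitivity_alt r
instance (r : List (List Int)) (out : Bool) : Decidable (Spec_transitivity r out) := by unfold Spec_transitivity; infer_instance

-- ===== CLAIM (what is proved, stated in full; the proofs are below) =====
def Claim_equal_transitivity : Prop := ∀ (r : List (List Int)), Dom_transitivity r → Pre_transitivity r → Spec_transitivity r (transitivity r)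

-- ===== LEMMAS AND PROOFS =====

-- fold of 'if p x then t else false' is 'b && all p'
theorem pv_foldl_if_false {α : Type} (p : α → Bool) :
    ∀ (l : List α) (b : Bool),
      l.foldl (fun t x => if p x then t else false) b = (b && l.all p) := by
  intro l
  induction l with
  | nil => intro b; simp
  | cons x t ih =>
      intro b
      simp only [List.foldl_cons, List.all_cons, ih]
      by_cases h : p x = true <;> simp [h]

theorem pv_foldl_and {α : Type} (q : α → Bool) :
    ∀ (l : List α) (b : Bool),
      l.foldl (fun t x => t && q x) b = (b && l.all q) := by
  intro l
  induction l with
  | nil => intro b; simp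
  | cons x t ih => intro b; simp [List.foldl_cons, ih, Bool.and_assoc]

-- A as a pure 'all' over the three ranges
theorem pv_A_all (r : List (List Int)) :
    transitivity r =
      (PySem.List.pyRange 0 (PySem.List.len r) 1).all (fun i =>
        (PySem.List.pyRange 0 (PySem.List.len r) 1).all (fun j =>
          (PySem.List.pyRange 0 (PySem.List.len r) 1).all (fun k =>
            decide (pvGet r i k ≥ min (pvGet r i j) (pvGet r j k))))) := by
  unfold transitivity
  have hk : ∀ (i j : Int) (b : Bool),
      (PySem.List.pyRange 0 (PySem.List.len r) 1).foldl (fun t3 k =>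
        if pvGet r i k ≥ min (pvGet r i j) (pvGet r j k) then t3 else false) b =
      (b && (PySem.List.pyRange 0 (PySem.List.len r) 1).all (fun k =>
        decide (pvGet r i k ≥ min (pvGet r i j) (pvGet r j k)))) := by
    intro i j b
    have := pv_foldl_if_false
      (fun k => decide (pvGet r i k ≥ min (pvGet r i j) (pvGet r j k)))
      (PySem.List.pyRange 0 (PySem.List.len r) 1) b
    simpa using this
  simp only [hk]
  have hj : ∀ (i : Int) (b : Bool),
      (PySem.List.pyRange 0 (PySem.List.len r) 1).foldl (fun t2 j =>
        (t2 && (PySem.List.pyRange 0 (PySem.List.len r) 1).all (fun k =>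
          decide (pvGet r i k ≥ min (pvGet r i j) (pvGet r j k))))) b =
      (b && (PySem.List.pyRange 0 (PySem.List.len r) 1).all (fun j =>
        (PySem.List.pyRange 0 (PySem.List.len r) 1).all (fun k =>
          decide (pvGet r i k ≥ min (pvGet r i j) (pvGet r j k))))) := by
    intro i b
    exact pv_foldl_and _ _ b
  simp only [hj]
  have := pv_foldl_and
    (fun i => (PySem.List.pyRange 0 (PySem.List.len r) 1).all (fun j =>
      (PySem.List.pyRange 0 (PySem.List.len r) 1).all (fun k =>
        decide (pvGet r i k ≥ min (pvGet r i j) (pvGet r j k)))))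
    (PySem.List.pyRange 0 (PySem.List.len r) 1) true
  simpa using this

-- 'a ≥ max of a nonempty list' iff 'a ≥ every element'
theorem pv_ge_max (l : List Int) (hl : l ≠ []) (a : Int) :
    decide (a ≥ (PySem.List.max? l (fun x => x)).getD 0) = l.all (fun y => decide (a ≥ y)) := by
  obtain ⟨m, hm⟩ : ∃ m, PySem.List.max? l (fun x => x) = some m := by
    cases h : PySem.List.max? l (fun x => x) with
    | none => exact absurd ((PySem.List.max?_eq_none_iff l (fun x => x)).mp h) hl
    | some m => exact ⟨m, rfl⟩
  have hmem : m ∈ l := PySem.List.max?_mem hm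
  have hmax : ∀ y ∈ l, y ≤ m := fun y hy => PySem.List.max?_isMax hm y hy
  rw [hm]
  simp only [Option.getD_some, ge_iff_le]
  by_cases h : m ≤ a
  · simp only [h, decide_true]
    symm
    rw [List.all_eq_true]
    intro y hy
    exact decide_eq_true (le_trans (hmax y hy) h)
  · simp only [h, decide_false]
    symm
    rw [Bool.eq_false_iff]
    intro hall
    rw [List.all_eq_true] at hall
    exact h (of_decide_eq_true (hall m hmem))

-- membership-restricted congruence for List.all
theorem pv_all_congr_mem {α : Type} {p q : α → Bool} :
    ∀ (l : List α), (∀ x ∈ l, p x = q x) → l.all p = l.all q := by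
  intro l
  induction l with
  | nil => intro _; rfl
  | cons x t ih =>
      intro h
      simp only [List.all_cons, h x (List.mem_cons_self), ih (fun y hy => h y (List.mem_cons_of_mem x hy))]

theorem pv_main (r : List (List Int)) : transitivity r = transitivity_alt r := by
  by_cases hr : r = []
  · subst hr; decide
  · have hpos : (0:Int) < PySem.List.len r := by
      simp only [PySem.List.len]
      exact_mod_cast List.length_pos_of_ne_nil hr
    rw [pv_A_all]
    unfold transitivity_alt
    simp only [beq_iff_eq]
    rw [if_neg (by omega : ¬ PySem.List.len r = 0)]
    have hcomp : ∀ i ∈ PySem.List.pyRange 0 (PySem.List.len r) 1,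
        ∀ k ∈ PySem.List.pyRange 0 (PySem.List.len r) 1,
        PySem.List.pyGetD (PySem.List.pyGetD
          ((PySem.List.pyRange 0 (PySem.List.len r) 1).map (fun i =>
            (PySem.List.pyRange 0 (PySem.List.len r) 1).map (fun k =>
              (PySem.List.max? ((PySem.List.pyRange 0 (PySem.List.len r) 1).map
                (fun j => min (pvGet r i j) (pvGet r j k))) (fun x => x)).getD 0))) i []) k 0 =
        (PySem.List.max? ((PySem.List.pyRange 0 (PySem.List.len r) 1).map
          (fun j => min (pvGet r i j) (pvGet r j k))) (fun x => x)).getD 0 := by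
      intro i hi k hk
      rw [PySem.List.mem_pyRange_one] at hi hk
      rw [PySem.List.pyGetD_map_pyRange_of_nonneg _ _ _ _ hi.1 hi.2,
          PySem.List.pyGetD_map_pyRange_of_nonneg _ _ _ _ hk.1 hk.2]
    apply pv_all_congr_mem
    intro i hi
    -- swap j/k on the A side: all_j all_k = all_k all_j
    have hswap :
        (PySem.List.pyRange 0 (PySem.List.len r) 1).all (fun j =>
          (PySem.List.pyRange 0 (PySem.List.len r) 1).all (fun k =>
            decide (pvGet r i k ≥ min (pvGet r i j) (pvGet r j k)))) =
        (PySem.List.pyRange 0 (PySem.List.len r) 1).all (fun k =>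
          (PySem.List.pyRange 0 (PySem.List.len r) 1).all (fun j =>
            decide (pvGet r i k ≥ min (pvGet r i j) (pvGet r j k)))) := by
      rw [Bool.eq_iff_iff]
      simp only [List.all_eq_true]
      constructor
      · exact fun h k hk j hj => h j hj k hk
      · exact fun h j hj k hk => h k hk j hj
    rw [hswap]
    apply pv_all_congr_mem
    intro k hk
    rw [hcomp i hi k hk, pv_ge_max]
    · rw [List.all_map]; rfl
    · simp only [ne_eq, List.map_eq_nil_iff]
      intro hnil
      have hlenr := PySem.List.length_pyRange_one 0 (PySem.List.len r)
      rw [hnil] at hlenr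
      simp only [List.length_nil] at hlenr
      omega

-- ===== VERDICT (by name: the statement is the Claim_ definition above) =====
theorem transitivity_spec : Claim_equal_transitivity := by
  intro r _ _
  unfold Spec_transitivity
  exact pv_main r
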